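-- pv_equiv track=rewrite | github.com/badMade/sql-compare | src/sql_compare/core.py | uppercase_outside_quotes
-- ===== SOURCE A (Python) =====
-- def uppercase_outside_quotes(s: str) -> str:
--     """
--     Uppercase characters outside of quoted regions.
--     """
--     out = []
--     i = 0
--     mode = None
--     while i < len(s):
--         ch = s[i]
--         if mode is None:
--             if ch == "'":
--                 mode = 'single'
--                 out.append(ch)
--             elif ch == '"':
--                 mode = 'double'
--                 out.append(ch)
--             elif ch == '[':
--                 mode = 'bracket'
--                 out.append(ch)
--             elif ch == '`':
--                 mode = 'backtick'
--                 out.append(ch)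
--             else:
--                 out.append(ch.upper())
--         elif mode == 'single':
--             out.append(ch)
--             if ch == "'":
--                 if i + 1 < len(s) and s[i + 1] == "'":
--                     out.append(s[i + 1]); i += 1
--                 else:
--                     mode = None
--         elif mode == 'double':
--             out.append(ch)
--             if ch == '"':
--                 if i + 1 < len(s) and s[i + 1] == '"':
--                     out.append(s[i + 1]); i += 1
--                 else:
--                     mode = None
--         elif mode == 'bracket':
--             out.append(ch)
--             if ch == ']':
--                 mode = None
--         elif mode == 'backtick':
--             out.append(ch)
--             if ch == '`':
--                 mode = None
--         i += 1
--     return "".join(out)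
-- ===== SOURCE B (Python) =====
-- def uppercase_outside_quotes(s: str) -> str:
--     """
--     Uppercase characters outside of quoted regions.
--
--     Region-at-a-time rewrite: instead of a per-character mode state machine,
--     consume each quoted/bracketed region wholesale and emit it verbatim.
--     """
--     out = []
--     i, n = 0, len(s)
--     while i < n:
--         ch = s[i]
--         if ch == "'" or ch == '"':
--             j = i + 1
--             while j < n:
--                 if s[j] == ch:
--                     if j + 1 < n and s[j + 1] == ch:
--                         j += 2
--                     else:
--                         j += 1
--                         break
--                 else:
--                     j += 1
--             out.append(s[i:j])
--             i = j
--         elif ch == '[' or ch == '`':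
--             close = ']' if ch == '[' else '`'
--             j = i + 1
--             while j < n and s[j] != close:
--                 j += 1
--             if j < n:
--                 j += 1
--             out.append(s[i:j])
--             i = j
--         else:
--             out.append(ch.upper())
--             i += 1
--     return "".join(out)
-- ===== Notes on version B (the rewrite author's own statement) =====
-- stated objective: alternative
-- what changed: Replaced A's single-pass per-character mode state machine with a region-at-a-time scanner: each quoted/bracketed region is consumed wholesale by an inner loop and emitted verbatim, so no mode variable is carried across iterations.
import Mathlib
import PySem

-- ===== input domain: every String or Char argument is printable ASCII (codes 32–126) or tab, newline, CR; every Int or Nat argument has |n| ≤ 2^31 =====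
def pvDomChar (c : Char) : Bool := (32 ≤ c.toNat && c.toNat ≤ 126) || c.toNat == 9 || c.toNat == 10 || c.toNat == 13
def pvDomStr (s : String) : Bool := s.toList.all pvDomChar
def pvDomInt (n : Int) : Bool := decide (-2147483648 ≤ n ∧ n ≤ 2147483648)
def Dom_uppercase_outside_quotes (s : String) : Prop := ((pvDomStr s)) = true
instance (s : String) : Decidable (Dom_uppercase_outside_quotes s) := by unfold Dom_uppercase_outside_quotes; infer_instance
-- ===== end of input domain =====

-- B rewrites A's per-character mode state machine as a region-at-a-time scanner (alternative decomposition, same cost).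

-- ===== PORT A =====
-- A's while loop over index i with a `mode` variable, as structural recursion on the
-- remaining characters with the same state (mode, out); the i += 2 escape step consumes two heads.
def upA (mode : Option String) (out : List Char) (cs : List Char) : List Char :=
  match cs with
  | [] => out
  | ch :: rest =>
    match mode with
    | none =>
      if ch = '\'' then upA (some "single") (out ++ [ch]) rest
      else if ch = '"' then upA (some "double") (out ++ [ch]) rest
      else if ch = '[' then upA (some "bracket") (out ++ [ch]) rest
      else if ch = '`' then upA (some "backtick") (out ++ [ch]) rest
      else upA none (out ++ [PySem.Chars.upperChar ch]) rest
    | some m =>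
      if m = "single" then
        if ch = '\'' then
          match _h : rest with
          | c2 :: rest2 =>
            if c2 = '\'' then upA (some "single") (out ++ [ch] ++ [c2]) rest2
            else upA none (out ++ [ch]) rest
          | [] => upA none (out ++ [ch]) []
        else upA (some "single") (out ++ [ch]) rest
      else if m = "double" then
        if ch = '"' then
          match _h : rest with
          | c2 :: rest2 =>
            if c2 = '"' then upA (some "double") (out ++ [ch] ++ [c2]) rest2
            else upA none (out ++ [ch]) rest
          | [] => upA none (out ++ [ch]) []
        else upA (some "double") (out ++ [ch]) rest
      else if m = "bracket" then
        if ch = ']' then upA none (out ++ [ch]) rest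
        else upA (some "bracket") (out ++ [ch]) rest
      else
        if ch = '`' then upA none (out ++ [ch]) rest
        else upA (some "backtick") (out ++ [ch]) rest
termination_by cs.length
decreasing_by all_goals simp_all

def uppercase_outside_quotes (s : String) : String := String.ofList (upA none [] s.toList)

-- ===== PORT B =====
-- Source B's inner `while` consuming a quoted region (doubled quotes stay inside the region)
def takeQuote (q : Char) (cs : List Char) : List Char × List Char :=
  match cs with
  | [] => ([], [])
  | c :: rest =>
    if c = q then
      match _h : rest with
      | c2 :: rest2 =>
        if c2 = q then
          let p := takeQuote q rest2
          (c :: c2 :: p.1, p.2)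
        else ([c], rest)
      | [] => ([c], [])
    else
      let p := takeQuote q rest
      (c :: p.1, p.2)
termination_by cs.length
decreasing_by all_goals simp_all

-- Source B's inner `while` consuming a bracket/backtick region up to its closer
def takeBracket (close : Char) (cs : List Char) : List Char × List Char :=
  match cs with
  | [] => ([], [])
  | c :: rest =>
    if c = close then ([c], rest)
    else
      let p := takeBracket close rest
      (c :: p.1, p.2)

-- unfolding takeQuote past a non-delimiter head (the flattened match equations need rest's shape)
theorem takeQuote_cons_ne (q c : Char) (h : ¬ c = q) (rest : List Char) :
    takeQuote q (c :: rest) = (c :: (takeQuote q rest).1, (takeQuote q rest).2) := by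
  cases rest <;> simp [takeQuote, h]

theorem takeQuote_snd_le_aux (q : Char) : ∀ (n : Nat) (cs : List Char), cs.length ≤ n →
    (takeQuote q cs).2.length ≤ cs.length := by
  intro n
  induction n with
  | zero =>
    intro cs h
    have : cs = [] := List.eq_nil_of_length_eq_zero (Nat.le_zero.mp h)
    subst this; simp [takeQuote]
  | succ n ih =>
    intro cs h
    match cs with
    | [] => simp [takeQuote]
    | c :: rest =>
      have hr : rest.length ≤ n := by simpa using h
      by_cases hc : c = q
      · subst hc
        match rest with
        | [] => simp [takeQuote]
        | c2 :: rest2 =>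
          by_cases h2 : c2 = c
          · subst h2
            have hr2 : rest2.length ≤ n := by simp at h; omega
            have := ih rest2 hr2
            simp only [takeQuote]
            simpa using by omega
          · simp [takeQuote, h2]
      · rw [takeQuote_cons_ne q c hc]
        have := ih rest hr
        simpa using by omega

theorem takeQuote_snd_length_le (q : Char) (cs : List Char) : (takeQuote q cs).2.length ≤ cs.length :=
  takeQuote_snd_le_aux q cs.length cs le_rfl

theorem takeBracket_snd_length_le (close : Char) (cs : List Char) : (takeBracket close cs).2.length ≤ cs.length := by
  induction cs with
  | nil => simp [takeBracket]
  | cons c rest ih =>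
    simp only [takeBracket]
    split
    · simp
    · simpa using by omega

-- Source B's outer `while`: one region or one plain character per step
def goB (cs : List Char) : List Char :=
  match cs with
  | [] => []
  | c :: rest =>
    if c = '\'' ∨ c = '"' then
      let p := takeQuote c rest
      c :: p.1 ++ goB p.2
    else if c = '[' then
      let p := takeBracket ']' rest
      c :: p.1 ++ goB p.2
    else if c = '`' then
      let p := takeBracket '`' rest
      c :: p.1 ++ goB p.2
    else PySem.Chars.upperChar c :: goB rest
termination_by cs.length
decreasing_by
  · exact Nat.lt_succ_of_le (takeQuote_snd_length_le _ _)
  · exact Nat.lt_succ_of_le (takeBracket_snd_length_le _ _)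
  · exact Nat.lt_succ_of_le (takeBracket_snd_length_le _ _)
  · simp

def uppercase_outside_quotes_alt (s : String) : String := String.ofList (goB s.toList)

-- ===== PRECONDITION & SPEC =====
def Spec_uppercase_outside_quotes (s : String) (out : String) : Prop := out = uppercase_outside_quotes_alt s
instance (s : String) (out : String) : Decidable (Spec_uppercase_outside_quotes s out) := by unfold Spec_uppercase_outside_quotes; infer_instance

-- ===== CLAIM (what is proved, stated in full; the proofs are below) =====
def Claim_equal_uppercase_outside_quotes : Prop := ∀ (s : String), Dom_uppercase_outside_quotes s → Spec_uppercase_outside_quotes s (uppercase_outside_quotes s)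

-- ===== LEMMAS AND PROOFS =====

-- unfolding upA in quote mode past a non-closing head (same flattened-match reason)
theorem upA_single_step (ch : Char) (h1 : ¬ ch = '\'') (out rest : List Char) :
    upA (some "single") out (ch :: rest) = upA (some "single") (out ++ [ch]) rest := by
  cases rest <;> simp [upA, h1]

theorem upA_double_step (ch : Char) (h1 : ¬ ch = '"') (out rest : List Char) :
    upA (some "double") out (ch :: rest) = upA (some "double") (out ++ [ch]) rest := by
  cases rest <;> simp [upA, h1]

theorem upA_bracket_close (out rest : List Char) :
    upA (some "bracket") out (']' :: rest) = upA none (out ++ [']']) rest := by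
  cases rest <;> simp [upA]

theorem upA_bracket_step (ch : Char) (h1 : ¬ ch = ']') (out rest : List Char) :
    upA (some "bracket") out (ch :: rest) = upA (some "bracket") (out ++ [ch]) rest := by
  cases rest <;> simp [upA, h1]

theorem upA_backtick_close (out rest : List Char) :
    upA (some "backtick") out ('`' :: rest) = upA none (out ++ ['`']) rest := by
  cases rest <;> simp [upA]

theorem upA_backtick_step (ch : Char) (h1 : ¬ ch = '`') (out rest : List Char) :
    upA (some "backtick") out (ch :: rest) = upA (some "backtick") (out ++ [ch]) rest := by
  cases rest <;> simp [upA, h1]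

-- A's state machine, started in any of its five modes, equals B's region scanner.
theorem upA_eq_goB : ∀ (n : Nat) (cs : List Char), cs.length ≤ n →
    (∀ out, upA none out cs = out ++ goB cs) ∧
    (∀ out, upA (some "single") out cs = out ++ (takeQuote '\'' cs).1 ++ goB (takeQuote '\'' cs).2) ∧
    (∀ out, upA (some "double") out cs = out ++ (takeQuote '"' cs).1 ++ goB (takeQuote '"' cs).2) ∧
    (∀ out, upA (some "bracket") out cs = out ++ (takeBracket ']' cs).1 ++ goB (takeBracket ']' cs).2) ∧
    (∀ out, upA (some "backtick") out cs = out ++ (takeBracket '`' cs).1 ++ goB (takeBracket '`' cs).2) := by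
  intro n
  induction n with
  | zero =>
    intro cs h
    have : cs = [] := List.eq_nil_of_length_eq_zero (Nat.le_zero.mp h)
    subst this
    simp [upA, goB, takeQuote, takeBracket]
  | succ n ih =>
    intro cs h
    match cs with
    | [] => simp [upA, goB, takeQuote, takeBracket]
    | ch :: rest =>
      have hr : rest.length ≤ n := by simpa using h
      have ihr := ih rest hr
      refine ⟨?_, ?_, ?_, ?_, ?_⟩ <;> intro out
      · -- mode = none
        by_cases h1 : ch = '\''
        · subst h1; simp [upA, goB, ihr.2.1]
        · by_cases h2 : ch = '"'
          · subst h2; simp [upA, goB, ihr.2.2.1]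
          · by_cases h3 : ch = '['
            · subst h3; simp [upA, goB, ihr.2.2.2.1]
            · by_cases h4 : ch = '`'
              · subst h4; simp [upA, goB, ihr.2.2.2.2]
              · simp [upA, goB, h1, h2, h3, h4, ihr.1]
      · -- mode = single
        by_cases h1 : ch = '\''
        · subst h1
          match rest with
          | [] => simp [upA, takeQuote, goB]
          | c2 :: rest2 =>
            by_cases h2 : c2 = '\''
            · subst h2
              have hr2 : rest2.length ≤ n := by simp at h; omega
              simp [upA, takeQuote, (ih rest2 hr2).2.1]
            · simp [upA, takeQuote, h2, (ih (c2 :: rest2) hr).1]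
        · rw [upA_single_step ch h1, takeQuote_cons_ne _ _ h1, ihr.2.1]
          simp
      · -- mode = double
        by_cases h1 : ch = '"'
        · subst h1
          match rest with
          | [] => simp [upA, takeQuote, goB]
          | c2 :: rest2 =>
            by_cases h2 : c2 = '"'
            · subst h2
              have hr2 : rest2.length ≤ n := by simp at h; omega
              simp [upA, takeQuote, (ih rest2 hr2).2.2.1]
            · simp [upA, takeQuote, h2, (ih (c2 :: rest2) hr).1]
        · rw [upA_double_step ch h1, takeQuote_cons_ne _ _ h1, ihr.2.2.1]
          simp
      · -- mode = bracket
        by_cases h1 : ch = ']'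
        · subst h1
          rw [upA_bracket_close, ihr.1]
          simp [takeBracket]
        · rw [upA_bracket_step ch h1, ihr.2.2.2.1]
          simp [takeBracket, h1]
      · -- mode = backtick
        by_cases h1 : ch = '`'
        · subst h1
          rw [upA_backtick_close, ihr.1]
          simp [takeBracket]
        · rw [upA_backtick_step ch h1, ihr.2.2.2.2]
          simp [takeBracket, h1]

-- ===== VERDICT (by name: the statement is the Claim_ definition above) =====
theorem uppercase_outside_quotes_spec : Claim_equal_uppercase_outside_quotes := by
  intro s _
  unfold Spec_uppercase_outside_quotes uppercase_outside_quotes uppercase_outside_quotes_alt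
  rw [(upA_eq_goB s.toList.length s.toList le_rfl).1]
  simp
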